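-- pv_equiv track=rewrite | github.com/supermaxxx/python | WhichCode.py | checkMD5
-- ===== SOURCE A (Python) =====
-- def checkMD5(inStr):
--     MD5KeyStrs = '0123456789abcdefABCDEF'
--     inStr = inStr.strip()    #判断MD5的时候把输入两端的空格切掉
--     if (len(inStr) != 16) and (len(inStr) != 32):
--         return False
--     else:
--         for eachChar in inStr:
--             if eachChar not in MD5KeyStrs:
--                 return False
--         return True
-- ===== SOURCE B (Python) =====
-- def checkMD5(inStr):
--     # Run the DFA of the anchored regex [0-9a-fA-F]{16}|[0-9a-fA-F]{32}
--     # over the stripped input: the state counts hex characters read so far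
--     # (dead state -1, entered on a non-hex character or past 32 characters);
--     # accept iff the final state is 16 or 32.
--     state = 0
--     for c in inStr.strip():
--         o = ord(c)
--         is_hex = 48 <= o <= 57 or 65 <= o <= 70 or 97 <= o <= 102
--         state = state + 1 if state != -1 and state != 32 and is_hex else -1
--     return state == 16 or state == 32
-- ===== Notes on version B (the rewrite author's own statement) =====
-- stated objective: alternative
-- what changed: Replaces A's up-front length guard plus early-return alphabet-membership loop by running the DFA of the anchored regex [0-9a-fA-F]{16}|[0-9a-fA-F]{32}: a single full pass with an integer state counting hex characters (dead state -1 via arithmetic code ranges), accepting iff the final state is 16 or 32.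
import Mathlib
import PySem

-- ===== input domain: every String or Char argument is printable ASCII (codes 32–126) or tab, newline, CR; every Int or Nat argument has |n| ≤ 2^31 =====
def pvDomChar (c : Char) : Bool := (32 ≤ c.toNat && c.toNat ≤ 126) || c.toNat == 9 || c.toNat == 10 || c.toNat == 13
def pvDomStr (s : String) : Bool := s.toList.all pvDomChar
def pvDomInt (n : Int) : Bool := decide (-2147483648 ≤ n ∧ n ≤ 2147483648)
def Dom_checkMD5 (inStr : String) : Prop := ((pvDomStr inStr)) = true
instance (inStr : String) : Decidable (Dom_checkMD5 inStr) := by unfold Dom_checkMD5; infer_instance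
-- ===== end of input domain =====

-- B replaces A's length guard plus early-return membership loop by a single full pass of the
-- DFA for the anchored regex [0-9a-fA-F]{16}|[0-9a-fA-F]{32} (state = hex chars read, -1 dead).

-- ===== PORT A =====
-- the hex alphabet string A compares against ('eachChar not in MD5KeyStrs')
def md5KeyStrs : List Char := "0123456789abcdefABCDEF".toList

-- A's for-loop with early 'return False'
def checkMD5_loop : List Char → Bool
  | [] => true
  | c :: rest => if (md5KeyStrs.contains c) = false then false else checkMD5_loop rest

def checkMD5 (inStr : String) : Bool :=
  let s := PySem.Str.strip inStr
  if PySem.Str.len s ≠ 16 ∧ PySem.Str.len s ≠ 32 then false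
  else checkMD5_loop s.toList

-- ===== PORT B =====
-- one DFA transition: is_hex by arithmetic code ranges, counter state, dead state -1
def md5Step (state : Int) (c : Char) : Int :=
  let o : Int := c.toNat
  let isHex : Bool := (48 ≤ o && o ≤ 57) || (65 ≤ o && o ≤ 70) || (97 ≤ o && o ≤ 102)
  if state ≠ -1 ∧ state ≠ 32 ∧ isHex then state + 1 else -1

def checkMD5_alt (inStr : String) : Bool :=
  let state := (PySem.Str.strip inStr).toList.foldl md5Step 0
  state == 16 || state == 32

-- ===== PRECONDITION & SPEC =====
def Spec_checkMD5 (inStr : String) (out : Bool) : Prop := out = checkMD5_alt inStr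
instance (inStr : String) (out : Bool) : Decidable (Spec_checkMD5 inStr out) := by unfold Spec_checkMD5; infer_instance

-- ===== CLAIM (what is proved, stated in full; the proofs are below) =====
def Claim_equal_checkMD5 : Prop := ∀ (inStr : String), Dom_checkMD5 inStr → Spec_checkMD5 inStr (checkMD5 inStr)

-- ===== LEMMAS AND PROOFS =====
theorem md5KeyStrs_eq : md5KeyStrs
    = ['0','1','2','3','4','5','6','7','8','9','a','b','c','d','e','f','A','B','C','D','E','F'] := by
  decide

theorem char_eq_iff_toNat (c d : Char) : c = d ↔ c.toNat = d.toNat :=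
  ⟨fun h => by rw [h], fun h => Char.ext (UInt32.toNat_inj.mp h)⟩

-- the DFA's hex test agrees with A's membership test in the alphabet string
theorem hex_eq_contains (c : Char) :
    ((48 ≤ (c.toNat : Int) && (c.toNat : Int) ≤ 57) || (65 ≤ (c.toNat : Int) && (c.toNat : Int) ≤ 70)
      || (97 ≤ (c.toNat : Int) && (c.toNat : Int) ≤ 102)) = md5KeyStrs.contains c := by
  rw [Bool.eq_iff_iff, md5KeyStrs_eq]
  simp only [List.contains_eq_mem, List.mem_cons, List.not_mem_nil, or_false,
    decide_eq_true_eq, Bool.or_eq_true, Bool.and_eq_true, decide_eq_true_eq,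
    char_eq_iff_toNat]
  have h0 : ('0' : Char).toNat = 48 := rfl
  have h1 : ('1' : Char).toNat = 49 := rfl
  have h2 : ('2' : Char).toNat = 50 := rfl
  have h3 : ('3' : Char).toNat = 51 := rfl
  have h4 : ('4' : Char).toNat = 52 := rfl
  have h5 : ('5' : Char).toNat = 53 := rfl
  have h6 : ('6' : Char).toNat = 54 := rfl
  have h7 : ('7' : Char).toNat = 55 := rfl
  have h8 : ('8' : Char).toNat = 56 := rfl
  have h9 : ('9' : Char).toNat = 57 := rfl
  have ha : ('a' : Char).toNat = 97 := rfl
  have hb : ('b' : Char).toNat = 98 := rfl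
  have hcc : ('c' : Char).toNat = 99 := rfl
  have hd : ('d' : Char).toNat = 100 := rfl
  have he : ('e' : Char).toNat = 101 := rfl
  have hf : ('f' : Char).toNat = 102 := rfl
  have hA : ('A' : Char).toNat = 65 := rfl
  have hB : ('B' : Char).toNat = 66 := rfl
  have hC : ('C' : Char).toNat = 67 := rfl
  have hD : ('D' : Char).toNat = 68 := rfl
  have hE : ('E' : Char).toNat = 69 := rfl
  have hF : ('F' : Char).toNat = 70 := rfl
  rw [h0, h1, h2, h3, h4, h5, h6, h7, h8, h9, ha, hb, hcc, hd, he, hf,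
    hA, hB, hC, hD, hE, hF]
  omega

theorem md5Step_nonhex (st : Int) (c : Char) (hc : md5KeyStrs.contains c = false) :
    md5Step st c = -1 := by
  simp only [md5Step, ← hex_eq_contains] at *
  rw [if_neg]
  rintro ⟨-, -, h⟩
  rw [hc] at h
  exact Bool.false_ne_true h

theorem md5Step_hex (k : Nat) (c : Char) (hc : md5KeyStrs.contains c = true) (h32 : k ≠ 32) :
    md5Step (k : Int) c = ((k + 1 : Nat) : Int) := by
  simp only [md5Step, ← hex_eq_contains] at *
  rw [if_pos ⟨by omega, by omega, hc⟩]
  push_cast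
  ring

theorem md5Step_full (c : Char) : md5Step ((32 : Nat) : Int) c = -1 := by
  simp only [md5Step]
  rw [if_neg]
  rintro ⟨-, h, -⟩
  exact h (by norm_num)

theorem foldl_dead (l : List Char) : l.foldl md5Step (-1) = -1 := by
  induction l with
  | nil => rfl
  | cons c rest ih =>
      have : md5Step (-1) c = -1 := by
        simp only [md5Step]
        rw [if_neg]
        rintro ⟨h, -, -⟩
        exact h rfl
      simpa [this] using ih

-- invariant: from a live state k ≤ 32 the DFA counts hex characters, else dies
theorem foldl_live (l : List Char) (k : Nat) (hk : k ≤ 32) :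
    l.foldl md5Step (k : Int)
      = if l.all (fun c => md5KeyStrs.contains c) ∧ k + l.length ≤ 32
        then ((k + l.length : Nat) : Int) else -1 := by
  induction l generalizing k with
  | nil => simp [hk]
  | cons c rest ih =>
      simp only [List.foldl_cons, List.all_cons, List.length_cons]
      by_cases hc : md5KeyStrs.contains c = true
      · by_cases h32 : k = 32
        · subst h32
          rw [md5Step_full, foldl_dead, if_neg (by rintro ⟨-, h⟩; omega)]
        · rw [md5Step_hex k c hc h32, ih (k + 1) (by omega)]
          by_cases hrest : rest.all (fun c => md5KeyStrs.contains c) = true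
          · simp only [hc, hrest, Bool.and_self, true_and]
            by_cases hlen : k + 1 + rest.length ≤ 32
            · rw [if_pos hlen, if_pos (by omega)]
              congr 1
              omega
            · rw [if_neg hlen, if_neg (by omega)]
          · rw [if_neg (fun h => hrest h.1),
              if_neg (fun h => hrest ((Bool.and_eq_true _ _).mp h.1).2)]
      · have hc' : md5KeyStrs.contains c = false := by
          simpa using hc
        rw [md5Step_nonhex _ _ hc', foldl_dead,
          if_neg (fun h => by rw [((Bool.and_eq_true _ _).mp h.1).1] at hc'; cases hc')]

-- A's loop is the all-membership scan
theorem checkMD5_loop_eq_all (l : List Char) :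
    checkMD5_loop l = l.all (fun c => md5KeyStrs.contains c) := by
  induction l with
  | nil => rfl
  | cons c rest ih =>
      simp only [checkMD5_loop, List.all_cons, ih]
      by_cases h : md5KeyStrs.contains c <;> simp_all

-- ===== VERDICT (by name: the statement is the Claim_ definition above) =====
theorem checkMD5_spec : Claim_equal_checkMD5 := by
  intro inStr _
  unfold Spec_checkMD5 checkMD5 checkMD5_alt
  have h0 : (0 : Int) = ((0 : Nat) : Int) := rfl
  rw [h0, foldl_live _ 0 (by omega)]
  simp only [checkMD5_loop_eq_all, PySem.Str.len_eq, Nat.zero_add]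
  set l := (PySem.Str.strip inStr).toList with hl
  set n := l.length with hn
  by_cases h16 : n = 16
  · rw [if_neg (by omega)]
    by_cases hall : l.all (fun c => md5KeyStrs.contains c) = true
    · rw [if_pos ⟨hall, by omega⟩, hall, h16]
      decide
    · rw [if_neg (fun h => hall h.1), Bool.not_eq_true] at *
      rw [hall]
      decide
  · by_cases h32 : n = 32
    · rw [if_neg (by omega)]
      by_cases hall : l.all (fun c => md5KeyStrs.contains c) = true
      · rw [if_pos ⟨hall, by omega⟩, hall, h32]
        decide
      · rw [if_neg (fun h => hall h.1), Bool.not_eq_true] at *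
        rw [hall]
        decide
    · rw [if_pos ⟨by omega, by omega⟩]
      by_cases hall : l.all (fun c => md5KeyStrs.contains c) = true
      · by_cases hlen : n ≤ 32
        · have e : (((n : Int) == 16) || ((n : Int) == 32)) = false := by
            simp only [Bool.or_eq_false_iff, beq_eq_false_iff_ne, ne_eq]
            constructor <;> omega
          rw [if_pos ⟨hall, hlen⟩, e]
        · rw [if_neg (fun h => hlen h.2)]
          decide
      · rw [if_neg (fun h => hall h.1)]
        decide
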